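-- pv_equiv track=rewrite | github.com/yanshengjia/algorithm | amazon/Substrings of size K with K distinct chars.py | unique_substring
-- ===== SOURCE A (Python) =====
-- def unique_substring(s: str, k: int) -> list:
--     if not s or k == 0:
--         return []
--     l = len(s)
--     res = []
--     for i in range(l - k + 1):
--         window = s[i:i+k]
--         if len(set(window)) == k and window not in res:
--             res.append(window)
--     return res
-- ===== SOURCE B (Python) =====
-- def unique_substring(s: str, k: int) -> list:
--     # Sliding window: incremental char counts + a seen-set for dedup (O(n) window checks).
--     n = len(s)
--     if k <= 0 or k > n:
--         return []
--     res = []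
--     seen = set()
--     count = {}
--     distinct = 0
--     for j in range(n):
--         c = s[j]
--         count[c] = count.get(c, 0) + 1
--         if count[c] == 1:
--             distinct += 1
--         if j >= k:
--             d = s[j - k]
--             count[d] = count[d] - 1
--             if count[d] == 0:
--                 distinct -= 1
--         if j >= k - 1 and distinct == k:
--             w = s[j - k + 1:j + 1]
--             if w not in seen:
--                 seen.add(w)
--                 res.append(w)
--     return res
-- ===== Notes on version B (the rewrite author's own statement) =====
-- stated objective: faster
-- what changed: Replaces A's per-window set construction and O(|res|) list-membership dedup with a single sliding-window pass keeping incremental per-character counts and a distinct counter, plus a hash-set of already-emitted windows for O(1) dedup.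
import Mathlib
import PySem

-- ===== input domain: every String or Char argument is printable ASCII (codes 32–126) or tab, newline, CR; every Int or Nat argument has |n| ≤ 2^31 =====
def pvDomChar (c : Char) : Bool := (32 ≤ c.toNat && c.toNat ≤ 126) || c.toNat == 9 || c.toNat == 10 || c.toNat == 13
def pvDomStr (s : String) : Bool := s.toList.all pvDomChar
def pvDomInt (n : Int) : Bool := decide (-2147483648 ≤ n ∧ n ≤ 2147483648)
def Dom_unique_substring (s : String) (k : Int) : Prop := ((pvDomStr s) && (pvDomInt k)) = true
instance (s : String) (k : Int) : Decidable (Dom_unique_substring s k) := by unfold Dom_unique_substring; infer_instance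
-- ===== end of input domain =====

-- B replaces A's per-window set build and O(|res|) list membership by a sliding window with
-- incremental character counts and a seen-set for dedup; equivalence of the return values is proved.

-- ===== PORT A =====
def unique_substring (s : String) (k : Int) : List String :=
  if s = "" || k == 0 then []
  else
    let l : Int := PySem.Str.len s
    (PySem.List.pyRange 0 (l - k + 1)).foldl
      (fun res i =>
        let window := PySem.Str.slice s (some i) (some (i + k))
        if ((PySem.Set.ofList window.toList).length : Int) == k && !(res.contains window)
        then res ++ [window] else res) []

-- ===== PORT B =====
def unique_substring_alt (s : String) (k : Int) : List String :=
  let n : Int := PySem.Str.len s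
  if k ≤ 0 || n < k then []
  else
    let fin := (PySem.List.pyRange 0 n).foldl
      (fun (st : PySem.Dict Char Int × Int × PySem.Set String × List String) j =>
        let count := st.1
        let distinct := st.2.1
        let seen := st.2.2.1
        let res := st.2.2.2
        let c := PySem.List.pyGetD s.toList j ' '
        let count := count.insert c (count.getD c 0 + 1)
        let distinct := if count.getD c 0 == 1 then distinct + 1 else distinct
        let p :=
          if k ≤ j then
            let d := PySem.List.pyGetD s.toList (j - k) ' '
            let count := count.insert d (count.getD d 0 - 1)
            let distinct := if count.getD d 0 == 0 then distinct - 1 else distinct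
            (count, distinct)
          else (count, distinct)
        let count := p.1
        let distinct := p.2
        if k - 1 ≤ j && distinct == k then
          let w := PySem.Str.slice s (some (j - k + 1)) (some (j + 1))
          if seen.contains w then (count, distinct, seen, res)
          else (count, distinct, seen.add w, res ++ [w])
        else (count, distinct, seen, res))
      (PySem.Dict.empty, 0, PySem.Set.empty, [])
    fin.2.2.2

-- ===== PRECONDITION & SPEC =====
def Spec_unique_substring (s : String) (k : Int) (out : List String) : Prop := out = unique_substring_alt s k
instance (s : String) (k : Int) (out : List String) : Decidable (Spec_unique_substring s k out) := by unfold Spec_unique_substring; infer_instance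

-- ===== CLAIM (what is proved, stated in full; the proofs are below) =====
def Claim_equal_unique_substring : Prop := ∀ (s : String) (k : Int), Dom_unique_substring s k → Spec_unique_substring s k (unique_substring s k)

-- ===== LEMMAS AND PROOFS =====

-- the common reference value: first-occurrence-deduplicated list of the nodup windows of length K
def pvCanon (chars : List Char) (K : Nat) (m : Nat) : List String :=
  (List.range m).foldl
    (fun res i =>
      let w := String.ofList ((chars.drop i).take K)
      if ((chars.drop i).take K).Nodup ∧ w ∉ res then res ++ [w] else res) []

theorem pvCanon_succ (chars : List Char) (K m : Nat) :
    pvCanon chars K (m + 1) =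
      (let w := String.ofList ((chars.drop m).take K)
       if ((chars.drop m).take K).Nodup ∧ w ∉ pvCanon chars K m then pvCanon chars K m ++ [w]
       else pvCanon chars K m) := by
  simp only [pvCanon, List.range_succ, List.foldl_append, List.foldl_cons, List.foldl_nil]

-- number of distinct elements of a list, as Set.ofList length and as toFinset.card
theorem pvSet_length (l : List Char) : (PySem.Set.ofList l).length = l.toFinset.card := by
  have hfin : (PySem.Set.ofList l).toFinset = l.toFinset := by
    apply Finset.ext; intro a
    simp [List.mem_toFinset, PySem.Set.mem_ofList]
  calc (PySem.Set.ofList l).length = (PySem.Set.ofList l).toFinset.card :=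
        (List.toFinset_card_of_nodup (PySem.Set.nodup_ofList l)).symm
    _ = l.toFinset.card := by rw [hfin]

theorem pvCard_append (l : List Char) (c : Char) :
    (l ++ [c]).toFinset.card = if c ∈ l then l.toFinset.card else l.toFinset.card + 1 := by
  rw [List.toFinset_append]
  simp only [List.toFinset_cons, List.toFinset_nil, insert_empty_eq]
  rw [Finset.union_singleton]
  by_cases h : c ∈ l
  · rw [if_pos h, Finset.card_insert_of_mem (List.mem_toFinset.mpr h)]
  · rw [if_neg h, Finset.card_insert_of_notMem (fun hc => h (List.mem_toFinset.mp hc))]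

theorem pvCard_cons (d : Char) (t : List Char) :
    (d :: t).toFinset.card = if d ∈ t then t.toFinset.card else t.toFinset.card + 1 := by
  rw [List.toFinset_cons]
  by_cases h : d ∈ t
  · rw [if_pos h, Finset.card_insert_of_mem (List.mem_toFinset.mpr h)]
  · rw [if_neg h, Finset.card_insert_of_notMem (fun hc => h (List.mem_toFinset.mp hc))]

theorem pvNodup_iff_card (l : List Char) : l.Nodup ↔ l.toFinset.card = l.length := by
  constructor
  · exact List.toFinset_card_of_nodup
  · intro h
    rw [List.card_toFinset] at h
    have := (List.dedup_sublist l).eq_of_length h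
    rw [← this]
    exact List.nodup_dedup l

-- the A side: A's loop equals pvCanon on the main range
theorem pvA_eq_canon (s : String) (k : Int) (K : Nat) (hk : k = (K : Int)) (h1 : 1 ≤ K)
    (hn : K ≤ s.toList.length) (hne : s ≠ "") :
    unique_substring s k = pvCanon s.toList K (s.toList.length - K + 1) := by
  have hk0 : (k == 0) = false := by simp [hk]; omega
  unfold unique_substring
  rw [if_neg (by simp [hne, hk0])]
  have hm : PySem.Str.len s - k + 1 = ((s.toList.length - K + 1 : Nat) : Int) := by
    rw [PySem.Str.len_eq, hk]; omega
  show List.foldl _ [] (PySem.List.pyRange 0 (PySem.Str.len s - k + 1)) = _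
  rw [hm, PySem.List.pyRange_zero_natCast, List.foldl_map]
  unfold pvCanon
  apply PySem.List.foldl_congr_mem
  intro acc i hi
  rw [List.mem_range] at hi
  have hiK : i + K ≤ s.toList.length := by omega
  have hwl : (PySem.Str.slice s (some (i:Int)) (some ((i:Int) + k))).toList
      = (s.toList.drop i).take K := by
    rw [PySem.Str.toList_slice, PySem.Chars.slice_eq_listSlice, hk]
    have h2 : ((i:Int) + (K:Int)) = ((i + K : Nat) : Int) := by push_cast; ring
    rw [h2, PySem.List.slice_natCast]
    congr 1
    omega
  have hws : PySem.Str.slice s (some (i:Int)) (some ((i:Int) + k))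
      = String.ofList ((s.toList.drop i).take K) := String.ext (by simp [hwl])
  have hlen : ((s.toList.drop i).take K).length = K := by
    simp only [List.length_take, List.length_drop]; omega
  show (if _ then acc ++ [PySem.Str.slice s (some (i:Int)) (some ((i:Int) + k))] else acc) = _
  rw [hws]
  apply if_congr _ rfl rfl
  rw [show (String.ofList ((s.toList.drop i).take K)).toList = (s.toList.drop i).take K from by simp, hk]
  rw [pvSet_length]
  constructor
  · intro h
    simp only [Bool.and_eq_true, beq_iff_eq, Bool.not_eq_eq_eq_not] at h
    obtain ⟨h1, h2⟩ := h
    refine ⟨(pvNodup_iff_card _).mpr ?_, by simpa using h2⟩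
    rw [hlen]
    exact_mod_cast h1
  · rintro ⟨h1, h2⟩
    simp only [Bool.and_eq_true, beq_iff_eq]
    refine ⟨?_, by simpa using h2⟩
    rw [(pvNodup_iff_card _).mp h1, hlen]


-- the B side: loop step (definitionally the lambda inside unique_substring_alt) and invariant
def pvBInit : PySem.Dict Char Int × Int × PySem.Set String × List String :=
  (PySem.Dict.empty, 0, PySem.Set.empty, [])

def pvBStep (s : String) (k : Int)
    (st : PySem.Dict Char Int × Int × PySem.Set String × List String) (j : Int) :
    PySem.Dict Char Int × Int × PySem.Set String × List String :=
  let count := st.1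
  let distinct := st.2.1
  let seen := st.2.2.1
  let res := st.2.2.2
  let c := PySem.List.pyGetD s.toList j ' '
  let count := count.insert c (count.getD c 0 + 1)
  let distinct := if count.getD c 0 == 1 then distinct + 1 else distinct
  let p :=
    if k ≤ j then
      let d := PySem.List.pyGetD s.toList (j - k) ' '
      let count := count.insert d (count.getD d 0 - 1)
      let distinct := if count.getD d 0 == 0 then distinct - 1 else distinct
      (count, distinct)
    else (count, distinct)
  let count := p.1
  let distinct := p.2
  if k - 1 ≤ j && distinct == k then
    let w := PySem.Str.slice s (some (j - k + 1)) (some (j + 1))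
    if seen.contains w then (count, distinct, seen, res)
    else (count, distinct, seen.add w, res ++ [w])
  else (count, distinct, seen, res)

-- the sliding window after j characters have been consumed
def pvW (chars : List Char) (K j : Nat) : List Char := (chars.take j).drop (j - K)

theorem pvB_inv (s : String) (k : Int) (K : Nat) (hk : k = (K : Int)) (h1 : 1 ≤ K)
    (hn : K ≤ s.toList.length) :
    ∀ j, j ≤ s.toList.length →
    ((∀ c : Char,
        ((List.map (fun (t : Nat) => (t : Int)) (List.range j)).foldl (pvBStep s k) pvBInit).1.getD c 0
          = ((pvW s.toList K j).count c : Int))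
     ∧ ((List.map (fun (t : Nat) => (t : Int)) (List.range j)).foldl (pvBStep s k) pvBInit).2.1
          = ((pvW s.toList K j).toFinset.card : Int)
     ∧ ((List.map (fun (t : Nat) => (t : Int)) (List.range j)).foldl (pvBStep s k) pvBInit).2.2.1
          = ((List.map (fun (t : Nat) => (t : Int)) (List.range j)).foldl (pvBStep s k) pvBInit).2.2.2
     ∧ ((List.map (fun (t : Nat) => (t : Int)) (List.range j)).foldl (pvBStep s k) pvBInit).2.2.2
          = pvCanon s.toList K (j - (K - 1))) := by
  intro j
  induction j with
  | zero =>
    intro _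
    refine ⟨?_, by simp [pvBInit, pvW], rfl, by simp [pvBInit, pvCanon]⟩
    intro c
    simp [pvBInit, pvW, PySem.Dict.getD_empty]
  | succ j ih =>
    intro hj1
    have hjn : j < s.toList.length := by omega
    obtain ⟨ihc, ihd, ihs, ihr⟩ := ih (by omega)
    rw [List.range_succ, List.map_append, List.foldl_append] at *
    set st := List.foldl (pvBStep s k) pvBInit (List.map (fun (t : Nat) => (t : Int)) (List.range j)) with hst
    simp only [List.map_cons, List.map_nil, List.foldl_cons, List.foldl_nil] at *
    -- the consumed character
    have hgetc : PySem.List.pyGetD s.toList (j : Int) ' ' = s.toList[j] := by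
      rw [PySem.List.pyGetD_natCast]; exact List.getD_eq_getElem _ _ hjn
    -- window evolution
    have hWlt : j < K → pvW s.toList K (j+1) = pvW s.toList K j ++ [s.toList[j]] := by
      intro hlt
      unfold pvW
      have e0 : j - K = 0 := by omega
      have e1 : j + 1 - K = 0 := by omega
      rw [e0, e1, List.drop_zero, List.drop_zero, List.take_succ_eq_append_getElem hjn]
    have hWge : K ≤ j → pvW s.toList K j ++ [s.toList[j]] = s.toList[j-K] :: pvW s.toList K (j+1) := by
      intro hge
      unfold pvW
      have hlt1 : j - K < (s.toList.take j).length := by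
        rw [List.length_take]; omega
      rw [List.take_succ_eq_append_getElem hjn,
          List.drop_append_of_le_length (by rw [List.length_take]; omega),
          List.drop_eq_getElem_cons hlt1, List.getElem_take]
      have e2 : j - K + 1 = j + 1 - K := by omega
      rw [e2]
      rfl
    -- length of the new window once it is full
    have hlenW1 : K ≤ j + 1 → (pvW s.toList K (j+1)).length = K := by
      intro h
      unfold pvW
      rw [List.length_drop, List.length_take]
      omega
    -- the emitted window as a string
    have hww : K ≤ j + 1 → PySem.Str.slice s (some ((j:Int) - k + 1)) (some ((j:Int) + 1))
        = String.ofList (pvW s.toList K (j+1)) := by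
      intro h
      apply String.ext
      rw [PySem.Str.toList_slice, PySem.Chars.slice_eq_listSlice]
      have e1 : ((j:Int) - k + 1) = ((j + 1 - K : Nat) : Int) := by rw [hk]; omega
      have e2 : ((j:Int) + 1) = ((j + 1 : Nat) : Int) := by push_cast; ring
      rw [e1, e2, PySem.List.slice_natCast]
      rw [show (String.ofList (pvW s.toList K (j+1))).toList = pvW s.toList K (j+1) from by simp]
      unfold pvW
      rw [List.drop_take]
    -- the canon window at index j-(K-1)
    have hcw : K ≤ j + 1 → (s.toList.drop (j - (K-1))).take K = pvW s.toList K (j+1) := by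
      intro h
      unfold pvW
      have e : j + 1 - K = j - (K - 1) := by omega
      rw [List.drop_take, e]
      congr 1
      omega
    -- count dict after the insert of c
    have hg1 : ∀ ch : Char, (st.1.insert s.toList[j] (st.1.getD s.toList[j] 0 + 1)).getD ch 0
        = (((pvW s.toList K j ++ [s.toList[j]]).count ch : Nat) : Int) := by
      intro ch
      rw [PySem.Dict.getD_insert]
      by_cases hc : ch = s.toList[j]
      · rw [if_pos hc, ihc, hc]
        simp [List.count_append]
      · rw [if_neg hc, ihc]
        have : List.count ch [s.toList[j]] = 0 := by
          simp only [List.count_singleton, beq_iff_eq, ite_eq_right_iff, one_ne_zero, imp_false]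
          exact mt Eq.symm hc
        rw [List.count_append, this, Nat.add_zero]
    -- emission step, shared by both cases
    have key : ∀ (cnt : PySem.Dict Char Int) (seen res : List String),
        (∀ ch : Char, cnt.getD ch 0 = ((pvW s.toList K (j+1)).count ch : Int)) →
        seen = res → res = pvCanon s.toList K (j - (K - 1)) →
        (let E := if (k - 1 ≤ (j:Int) && (((pvW s.toList K (j+1)).toFinset.card : Int) == k)) then
            (let w := PySem.Str.slice s (some ((j:Int) - k + 1)) (some ((j:Int) + 1));
             if PySem.Set.contains seen w then
               (cnt, ((pvW s.toList K (j+1)).toFinset.card : Int), seen, res)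
             else
               (cnt, ((pvW s.toList K (j+1)).toFinset.card : Int), PySem.Set.add seen w, res ++ [w]))
          else (cnt, ((pvW s.toList K (j+1)).toFinset.card : Int), seen, res)
         (∀ ch : Char, E.1.getD ch 0 = ((pvW s.toList K (j+1)).count ch : Int))
         ∧ E.2.1 = ((pvW s.toList K (j+1)).toFinset.card : Int)
         ∧ E.2.2.1 = E.2.2.2
         ∧ E.2.2.2 = pvCanon s.toList K (j + 1 - (K - 1))) := by
      intro cnt seen res hcnt hsr hres
      by_cases hem : K ≤ j + 1
      · have hb1 : (k - 1 ≤ (j:Int)) := by rw [hk]; omega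
        have hmm : j - (K - 1) + 1 = j + 1 - (K - 1) := by omega
        by_cases hcard : (pvW s.toList K (j+1)).toFinset.card = K
        · have hcondT : (k - 1 ≤ (j:Int) && (((pvW s.toList K (j+1)).toFinset.card : Int) == k)) = true := by
            simp only [Bool.and_eq_true, decide_eq_true_eq, beq_iff_eq]
            exact ⟨hb1, by rw [hcard, hk]⟩
          have hnd : (pvW s.toList K (j+1)).Nodup := by
            rw [pvNodup_iff_card, hlenW1 hem, hcard]
          rw [hcondT, if_pos rfl, hww hem]
          by_cases hw : String.ofList (pvW s.toList K (j+1)) ∈ res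
          · rw [if_pos (by rw [PySem.Set.contains_iff, hsr]; exact hw)]
            refine ⟨hcnt, rfl, hsr, ?_⟩
            rw [hres, ← hmm, pvCanon_succ]
            simp only [hcw hem]
            rw [if_neg]
            rintro ⟨-, habs⟩
            exact habs (hres ▸ hw)
          · rw [if_neg (show ¬ (PySem.Set.contains seen (String.ofList (pvW s.toList K (j+1))) = true) from by
                rw [PySem.Set.contains_iff, hsr]; exact hw)]
            have hwseen : String.ofList (pvW s.toList K (j+1)) ∉ seen := by rw [hsr]; exact hw
            refine ⟨hcnt, rfl, ?_, ?_⟩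
            · show PySem.Set.add seen _ = res ++ _
              rw [PySem.Set.add_of_not_mem hwseen, hsr]
            · show res ++ _ = _
              rw [hres, ← hmm, pvCanon_succ]
              simp only [hcw hem]
              rw [if_pos ⟨hnd, by rw [← hres]; exact hw⟩]
        · have hcondF : (k - 1 ≤ (j:Int) && (((pvW s.toList K (j+1)).toFinset.card : Int) == k)) = false := by
            simp only [Bool.and_eq_false_iff, beq_eq_false_iff_ne]
            refine Or.inr (fun habs => hcard ?_)
            rw [hk] at habs
            exact_mod_cast habs
          rw [hcondF, if_neg (by simp)]
          refine ⟨hcnt, rfl, hsr, ?_⟩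
          rw [hres, ← hmm, pvCanon_succ]
          simp only [hcw hem]
          rw [if_neg]
          rintro ⟨hnd, -⟩
          exact hcard (by rw [(pvNodup_iff_card _).mp hnd, hlenW1 hem])
      · have hcondF : (k - 1 ≤ (j:Int) && (((pvW s.toList K (j+1)).toFinset.card : Int) == k)) = false := by
          have hlt : ¬ (k - 1 ≤ (j:Int)) := by rw [hk]; omega
          simp [hlt]
        rw [hcondF, if_neg (by simp)]
        refine ⟨hcnt, rfl, hsr, ?_⟩
        have e : j - (K - 1) = j + 1 - (K - 1) := by omega
        rw [hres, e]
    -- now compute the step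
    show (∀ c : Char, (pvBStep s k st (j:Int)).1.getD c 0 = _) ∧ _ ∧ _ ∧ _
    simp only [pvBStep, hgetc]
    by_cases hKj : K ≤ j
    · -- removal branch taken
      have hkj : k ≤ (j:Int) := by rw [hk]; exact_mod_cast hKj
      have hgetd : PySem.List.pyGetD s.toList ((j:Int) - k) ' ' = s.toList[j - K] := by
        have e : (j:Int) - k = ((j - K : Nat) : Int) := by rw [hk]; omega
        rw [e, PySem.List.pyGetD_natCast]
        exact List.getD_eq_getElem _ _ (by omega)
      rw [if_pos hkj, hgetd]
      have hW := hWge hKj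
      have hcc : (pvW s.toList K j ++ [s.toList[j]]).count s.toList[j]
          = (pvW s.toList K j).count s.toList[j] + 1 := by simp [List.count_append]
      have hd1 : (if ((st.1.insert s.toList[j] (st.1.getD s.toList[j] 0 + 1)).getD s.toList[j] 0 == 1)
          then st.2.1 + 1 else st.2.1)
          = (((pvW s.toList K j ++ [s.toList[j]]).toFinset.card : Nat) : Int) := by
        rw [hg1, ihd, pvCard_append, hcc]
        by_cases hm : s.toList[j] ∈ pvW s.toList K j
        · rw [if_neg (by
              simp only [beq_iff_eq]
              have := List.count_pos_iff.mpr hm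
              push_cast
              omega), if_pos hm]
        · rw [List.count_eq_zero.mpr hm, if_pos (by norm_num), if_neg hm]
          push_cast
          ring
      have hg2 : ∀ ch : Char,
          ((st.1.insert s.toList[j] (st.1.getD s.toList[j] 0 + 1)).insert s.toList[j-K]
            ((st.1.insert s.toList[j] (st.1.getD s.toList[j] 0 + 1)).getD s.toList[j-K] 0 - 1)).getD ch 0
          = ((pvW s.toList K (j+1)).count ch : Int) := by
        intro ch
        rw [PySem.Dict.getD_insert]
        by_cases hd : ch = s.toList[j-K]
        · rw [if_pos hd, hg1, hW, hd, List.count_cons_self]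
          push_cast
          ring
        · rw [if_neg hd, hg1, hW, List.count_cons_of_ne (Ne.symm hd)]
      have hdist2 : (if (((st.1.insert s.toList[j] (st.1.getD s.toList[j] 0 + 1)).insert s.toList[j-K]
            ((st.1.insert s.toList[j] (st.1.getD s.toList[j] 0 + 1)).getD s.toList[j-K] 0 - 1)).getD s.toList[j-K] 0 == 0)
          then (if ((st.1.insert s.toList[j] (st.1.getD s.toList[j] 0 + 1)).getD s.toList[j] 0 == 1)
                then st.2.1 + 1 else st.2.1) - 1
          else (if ((st.1.insert s.toList[j] (st.1.getD s.toList[j] 0 + 1)).getD s.toList[j] 0 == 1)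
                then st.2.1 + 1 else st.2.1))
          = (((pvW s.toList K (j+1)).toFinset.card : Nat) : Int) := by
        rw [hg2, hd1, hW, pvCard_cons]
        by_cases hd : s.toList[j-K] ∈ pvW s.toList K (j+1)
        · rw [if_pos hd, if_neg (by
            simp only [beq_iff_eq]
            have := List.count_pos_iff.mpr hd
            omega)]
        · rw [if_neg hd, if_pos (by simp [List.count_eq_zero.mpr hd])]
          push_cast
          ring
      rw [hdist2]
      exact key _ st.2.2.1 st.2.2.2 hg2 ihs ihr
    · have hkj : ¬ (k ≤ (j:Int)) := by rw [hk]; omega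
      rw [if_neg hkj]
      have hW := hWlt (by omega)
      have hcc : (pvW s.toList K j ++ [s.toList[j]]).count s.toList[j]
          = (pvW s.toList K j).count s.toList[j] + 1 := by simp [List.count_append]
      have hd1 : (if ((st.1.insert s.toList[j] (st.1.getD s.toList[j] 0 + 1)).getD s.toList[j] 0 == 1)
          then st.2.1 + 1 else st.2.1)
          = (((pvW s.toList K (j+1)).toFinset.card : Nat) : Int) := by
        rw [hW, hg1, ihd, pvCard_append, hcc]
        by_cases hm : s.toList[j] ∈ pvW s.toList K j
        · rw [if_neg (by
              simp only [beq_iff_eq]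
              have := List.count_pos_iff.mpr hm
              push_cast
              omega), if_pos hm]
        · rw [List.count_eq_zero.mpr hm, if_pos (by norm_num), if_neg hm]
          push_cast
          ring
      have hcnt1 : ∀ ch : Char,
          (st.1.insert s.toList[j] (st.1.getD s.toList[j] 0 + 1)).getD ch 0
          = ((pvW s.toList K (j+1)).count ch : Int) := by
        intro ch
        rw [hg1, ← hW]
      rw [hd1]
      exact key _ st.2.2.1 st.2.2.2 hcnt1 ihs ihr

-- the B side: B's loop equals pvCanon
theorem pvB_eq_canon (s : String) (k : Int) (K : Nat) (hk : k = (K : Int)) (h1 : 1 ≤ K)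
    (hn : K ≤ s.toList.length) :
    unique_substring_alt s k = pvCanon s.toList K (s.toList.length - K + 1) := by
  unfold unique_substring_alt
  rw [if_neg (by
    rw [PySem.Str.len_eq]
    simp only [Bool.or_eq_true, decide_eq_true_eq, not_or]
    constructor <;> [skip; simp only [not_lt]] <;> [simp only [not_le]; skip] <;> omega)]
  show (List.foldl (pvBStep s k) pvBInit (PySem.List.pyRange 0 (PySem.Str.len s))).2.2.2 = _
  rw [PySem.Str.len_eq, PySem.List.pyRange_zero_natCast]
  have h := (pvB_inv s k K hk h1 hn s.toList.length le_rfl).2.2.2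
  rw [h]
  congr 1
  omega

-- degenerate cases
theorem pvA_nil_of_neg (s : String) (k : Int) (hk : k < 0) : unique_substring s k = [] := by
  unfold unique_substring
  by_cases hs : s = ""
  · simp [hs]
  · have hk0 : (k == 0) = false := by simp; omega
    rw [if_neg (by simp [hk0, hs])]
    rw [PySem.List.foldl_congr_mem _ _ (fun res _ => res) _ ?_]
    · exact PySem.List.foldl_ignore _ _
    · intro acc x hx
      simp only [Bool.and_eq_true, beq_iff_eq]
      rw [if_neg]
      rintro ⟨h, -⟩
      omega

theorem pvA_nil_of_big (s : String) (k : Int) (hk : (s.toList.length : Int) < k) :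
    unique_substring s k = [] := by
  unfold unique_substring
  by_cases hs : s = ""
  · simp [hs]
  · have hlen : (0:Int) ≤ (s.toList.length : Int) := by positivity
    have hk0 : (k == 0) = false := by simp; omega
    rw [if_neg (by simp [hk0, hs])]
    have hrange : PySem.List.pyRange 0 (PySem.Str.len s - k + 1) = [] := by
      rw [List.eq_nil_iff_forall_not_mem]
      intro x hx
      rw [PySem.List.mem_pyRange_one] at hx
      rw [PySem.Str.len_eq] at hx
      omega
    show List.foldl _ [] (PySem.List.pyRange 0 (PySem.Str.len s - k + 1)) = []
    rw [hrange]
    rfl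

-- ===== VERDICT (by name: the statement is the Claim_ definition above) =====
theorem unique_substring_spec : Claim_equal_unique_substring := by
  intro s k _
  unfold Spec_unique_substring
  by_cases hk0 : k ≤ 0
  · have hB : unique_substring_alt s k = [] := by
      unfold unique_substring_alt
      rw [if_pos (by simp [hk0])]
    rw [hB]
    rcases lt_or_eq_of_le hk0 with hlt | heq
    · exact pvA_nil_of_neg s k hlt
    · unfold unique_substring
      rw [if_pos (by simp [heq])]
  · by_cases hbig : (s.toList.length : Int) < k
    · have hB : unique_substring_alt s k = [] := by
        unfold unique_substring_alt
        rw [if_pos (by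
          rw [PySem.Str.len_eq]
          simp only [Bool.or_eq_true, decide_eq_true_eq]
          exact Or.inr hbig)]
      rw [hB]
      exact pvA_nil_of_big s k hbig
    · have hk1 : 1 ≤ k := by omega
      have hkK : k = (k.toNat : Int) := by omega
      have h1 : 1 ≤ k.toNat := by omega
      have hn : k.toNat ≤ s.toList.length := by omega
      have hne : s ≠ "" := by
        intro h
        subst h
        simp at hn
        omega
      rw [pvA_eq_canon s k k.toNat hkK h1 hn hne, pvB_eq_canon s k k.toNat hkK h1 hn]
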